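-- pv_equiv track=rewrite | github.com/Jose-Edu/Brain-Cleaner | utilities.py | set_inline_code
-- ===== SOURCE A (Python) =====
-- def set_inline_code(code) -> str:
--
--     scope = 0
--     _code = code
--
--     for index, char in enumerate(_code):
--         if char in ('{', '('):
--             scope += 1
--         elif char in ('}', ')'):
--             scope -= 1
--         elif char == ';' and scope == 0:
--             _code = _code[:index]+'\n'+code[index+1:]
--
--     return _code
-- ===== SOURCE B (Python) =====
-- def set_inline_code(code) -> str:
--     # Pass 1: record the bracket depth that applies at each character position.
--     depths = []
--     d = 0
--     for ch in code:
--         depths.append(d)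
--         if ch in ('{', '('):
--             d += 1
--         elif ch in ('}', ')'):
--             d -= 1
--     # Pass 2: replace each top-level ';' (depth 0) with '\n', join once.
--     return ''.join('\n' if ch == ';' and dep == 0 else ch
--                    for ch, dep in zip(code, depths))
-- ===== Notes on version B (the rewrite author's own statement) =====
-- stated objective: alternative
-- what changed: A rebuilds the whole string by slicing and concatenating at every top-level semicolon inside one enumerate loop; B first records the running bracket depth before each position in one pass, then maps each character (top-level semicolons become newlines) and joins once.
import Mathlib
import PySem

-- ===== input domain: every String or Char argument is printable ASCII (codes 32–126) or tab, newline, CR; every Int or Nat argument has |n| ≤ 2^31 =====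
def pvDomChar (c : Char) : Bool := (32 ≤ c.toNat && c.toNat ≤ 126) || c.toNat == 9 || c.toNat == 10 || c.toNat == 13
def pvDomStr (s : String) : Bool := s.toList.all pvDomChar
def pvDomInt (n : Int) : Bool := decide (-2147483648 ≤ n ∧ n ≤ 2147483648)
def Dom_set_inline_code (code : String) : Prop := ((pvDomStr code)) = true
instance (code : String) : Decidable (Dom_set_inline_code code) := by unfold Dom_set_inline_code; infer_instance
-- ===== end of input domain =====

-- B replaces A's in-loop slice-and-concatenate string rebuilding with one depth-recording
-- pass followed by one per-character mapping pass joined once (objective: alternative decomposition).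

-- ===== PORT A =====
def set_inline_code (code : String) : String :=
  String.mk ((PySem.List.enumerate code.toList).foldl (fun (st : Int × List Char) ic =>
    let scope := st.1
    let _code := st.2
    let index := ic.1
    let char := ic.2
    if char = '{' ∨ char = '(' then (scope + 1, _code)
    else if char = '}' ∨ char = ')' then (scope - 1, _code)
    else if char = ';' ∧ scope = 0 then
      (scope, PySem.List.slice _code none (some index) ++ '\n' :: PySem.List.slice code.toList (some (index + 1)) none)
    else (scope, _code)) (0, code.toList)).2

-- ===== PORT B =====
def set_inline_code_alt (code : String) : String :=
  String.mk ((code.toList.zip (code.toList.foldl (fun (st : Int × List Int) ch =>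
      (if ch = '{' ∨ ch = '(' then st.1 + 1
       else if ch = '}' ∨ ch = ')' then st.1 - 1
       else st.1,
       st.2 ++ [st.1])) (0, [])).2).map (fun p => if p.1 = ';' ∧ p.2 = 0 then '\n' else p.1))

-- ===== PRECONDITION & SPEC =====
def Spec_set_inline_code (code : String) (out : String) : Prop := out = set_inline_code_alt code
instance (code : String) (out : String) : Decidable (Spec_set_inline_code code out) := by unfold Spec_set_inline_code; infer_instance

-- ===== CLAIM (what is proved, stated in full; the proofs are below) =====
def Claim_equal_set_inline_code : Prop := ∀ (code : String), Dom_set_inline_code code → Spec_set_inline_code code (set_inline_code code)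

-- ===== LEMMAS AND PROOFS =====

-- depth update for one character
def sicStep (d : Int) (c : Char) : Int :=
  if c = '{' ∨ c = '(' then d + 1 else if c = '}' ∨ c = ')' then d - 1 else d

-- the per-position depths, starting from depth d
def sicDepths (d : Int) : List Char → List Int
  | [] => []
  | c :: cs => d :: sicDepths (sicStep d c) cs

-- reference transform: replace each ';' at depth 0 by '\n'
def sicG (d : Int) : List Char → List Char
  | [] => []
  | c :: cs => (if c = ';' ∧ d = 0 then '\n' else c) :: sicG (sicStep d c) cs

-- B: the fold's accumulated list is acc ++ sicDepths d cs
theorem b_fold (cs : List Char) : ∀ (d : Int) (acc : List Int),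
    (cs.foldl (fun (st : Int × List Int) ch =>
      (if ch = '{' ∨ ch = '(' then st.1 + 1
       else if ch = '}' ∨ ch = ')' then st.1 - 1
       else st.1,
       st.2 ++ [st.1])) (d, acc)).2 = acc ++ sicDepths d cs := by
  induction cs with
  | nil => intro d acc; simp [sicDepths]
  | cons c cs ih =>
    intro d acc
    simp only [List.foldl_cons, sicDepths]
    rw [ih]
    simp [sicStep]

theorem b_zip (cs : List Char) : ∀ (d : Int),
    (cs.zip (sicDepths d cs)).map (fun p => if p.1 = ';' ∧ p.2 = 0 then '\n' else p.1)
      = sicG d cs := by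
  induction cs with
  | nil => intro d; rfl
  | cons c cs ih => intro d; simp [sicDepths, sicG, ih]

theorem b_eq (code : String) : set_inline_code_alt code = String.mk (sicG 0 code.toList) := by
  unfold set_inline_code_alt
  rw [b_fold code.toList 0 []]
  simp [b_zip]

-- A: loop invariant. cs is the original list, pre the already-transformed prefix.
theorem a_inv (cs : List Char) (suf : List Char) : ∀ (pre pre0 : List Char) (d : Int),
    cs = pre0 ++ suf → pre.length = pre0.length →
    ((PySem.List.enumerate suf (pre0.length : Int)).foldl (fun (st : Int × List Char) ic =>
      let scope := st.1
      let _code := st.2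
      let index := ic.1
      let char := ic.2
      if char = '{' ∨ char = '(' then (scope + 1, _code)
      else if char = '}' ∨ char = ')' then (scope - 1, _code)
      else if char = ';' ∧ scope = 0 then
        (scope, PySem.List.slice _code none (some index) ++ '\n' :: PySem.List.slice cs (some (index + 1)) none)
      else (scope, _code)) (d, pre ++ suf)).2 = pre ++ sicG d suf := by
  induction suf with
  | nil => intro pre pre0 d _ _; simp [PySem.List.enumerate_nil, sicG]
  | cons c rest ih =>
    intro pre pre0 d hcs hlen
    have hcast : (pre0.length : Int) + 1 = (((pre0 ++ [c]).length : Nat) : Int) := by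
      simp
    rw [PySem.List.enumerate_cons, List.foldl_cons]
    by_cases h1 : c = '{' ∨ c = '('
    · simp only [eq_true h1, if_true]
      rw [show pre ++ c :: rest = (pre ++ [c]) ++ rest by simp, hcast,
        ih (pre ++ [c]) (pre0 ++ [c]) (d + 1) (by simp [hcs]) (by simp [hlen])]
      have hc : ¬ (c = ';' ∧ d = 0) := by rcases h1 with h1 | h1 <;> simp [h1]
      simp [sicG, sicStep, h1, hc]
    · by_cases h2 : c = '}' ∨ c = ')'
      · simp only [eq_false h1, eq_true h2, if_true, if_false]
        rw [show pre ++ c :: rest = (pre ++ [c]) ++ rest by simp, hcast,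
          ih (pre ++ [c]) (pre0 ++ [c]) (d - 1) (by simp [hcs]) (by simp [hlen])]
        have hc : ¬ (c = ';' ∧ d = 0) := by rcases h2 with h2 | h2 <;> simp [h2]
        simp [sicG, sicStep, h1, h2, hc]
      · by_cases h3 : c = ';' ∧ d = 0
        · simp only [eq_false h1, eq_false h2, eq_true h3, if_true, if_false]
          have hslice1 : PySem.List.slice (pre ++ c :: rest) none (some (pre0.length : Int))
              = pre := by
            rw [PySem.List.slice_to_natCast, ← hlen, List.take_left' rfl]
          have hslice2 : PySem.List.slice cs (some ((pre0.length : Int) + 1)) none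
              = rest := by
            rw [hcast, PySem.List.slice_from_natCast, hcs,
              show pre0 ++ c :: rest = (pre0 ++ [c]) ++ rest by simp, List.drop_left]
          rw [hslice1, hslice2,
            show pre ++ '\n' :: rest = (pre ++ ['\n']) ++ rest by simp, hcast,
            ih (pre ++ ['\n']) (pre0 ++ [c]) d (by simp [hcs]) (by simp [hlen])]
          simp [sicG, sicStep, h3]
        · simp only [eq_false h1, eq_false h2, eq_false h3, if_false]
          rw [show pre ++ c :: rest = (pre ++ [c]) ++ rest by simp, hcast,
            ih (pre ++ [c]) (pre0 ++ [c]) d (by simp [hcs]) (by simp [hlen])]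
          have hstep : sicStep d c = d := by simp [sicStep, h1, h2]
          simp [sicG, hstep, h3]

theorem a_eq (code : String) : set_inline_code code = String.mk (sicG 0 code.toList) := by
  unfold set_inline_code
  have h := a_inv code.toList code.toList [] [] 0 rfl rfl
  simp only [List.nil_append, List.length_nil, Nat.cast_zero] at h
  simp only [h]

-- ===== VERDICT (by name: the statement is the Claim_ definition above) =====
theorem set_inline_code_spec : Claim_equal_set_inline_code := by
  intro code _
  unfold Spec_set_inline_code
  rw [a_eq, b_eq]
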